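-- pv_equiv track=rewrite | github.com/portscher/Analysing-CNNs-on-blended-images | utils.py | check_if_one_common_element
-- ===== SOURCE A (Python) =====
-- from typing import List, Any, Dict, Union, Tuple
--
-- def check_if_one_common_element(
--         list1: List[Any],
--         list2: List[Any]
-- ) -> bool:
--     """
--     Compares two lists and checks if they have exactly one element in common
--     (For documenting prediction accuracy)
--     """
--     count = 0
--     for e in list1:
--         for f in list2:
--             if e == f:
--                 count += 1
--     return True if count == 1 else False
-- ===== SOURCE B (Python) =====
-- def check_if_one_common_element(list1, list2):
--     """
--     Compares two lists and checks if they have exactly one element in common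
--     (For documenting prediction accuracy)
--     """
--     counts = {}
--     for e in list1:
--         counts[e] = counts.get(e, 0) + 1
--     total = 0
--     for f in list2:
--         total += counts.get(f, 0)
--     return total == 1
-- ===== Notes on version B (the rewrite author's own statement) =====
-- stated objective: faster
-- what changed: Replaces the nested O(n*m) pairwise comparison with a one-pass dict of counts over list1 followed by a single pass over list2 summing looked-up counts.
import Mathlib
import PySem

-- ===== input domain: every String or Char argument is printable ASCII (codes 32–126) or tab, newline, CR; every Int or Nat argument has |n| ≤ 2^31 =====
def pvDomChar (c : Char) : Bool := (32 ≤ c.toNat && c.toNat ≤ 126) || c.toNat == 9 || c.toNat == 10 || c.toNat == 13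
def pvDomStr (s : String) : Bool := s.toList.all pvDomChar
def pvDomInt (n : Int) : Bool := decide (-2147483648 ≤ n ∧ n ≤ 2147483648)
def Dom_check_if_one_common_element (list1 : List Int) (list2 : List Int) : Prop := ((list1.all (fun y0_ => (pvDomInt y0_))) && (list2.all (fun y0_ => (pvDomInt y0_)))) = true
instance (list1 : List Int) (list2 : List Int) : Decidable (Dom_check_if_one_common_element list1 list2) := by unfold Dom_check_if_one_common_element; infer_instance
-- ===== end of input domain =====

-- B replaces A's nested O(n*m) pairwise scan with a dict of counts over list1 and one
-- summing pass over list2 (objective: faster, asymptotic).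

-- ===== PORT A =====
def check_if_one_common_element (list1 : List Int) (list2 : List Int) : Bool :=
  let count : Int :=
    list1.foldl (fun c e =>
      list2.foldl (fun c f => if e == f then c + 1 else c) c) 0
  if count == 1 then true else false

-- ===== PORT B =====
def check_if_one_common_element_alt (list1 : List Int) (list2 : List Int) : Bool :=
  let counts : PySem.Dict Int Int :=
    list1.foldl (fun d x => d.insert x (d.getD x 0 + 1)) PySem.Dict.empty
  let total : Int := list2.foldl (fun acc f => acc + counts.getD f 0) 0
  total == 1

-- ===== PRECONDITION & SPEC =====
def Spec_check_if_one_common_element (list1 : List Int) (list2 : List Int) (out : Bool) : Prop := out = check_if_one_common_element_alt list1 list2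
instance (list1 : List Int) (list2 : List Int) (out : Bool) : Decidable (Spec_check_if_one_common_element list1 list2 out) := by unfold Spec_check_if_one_common_element; infer_instance

-- ===== CLAIM (what is proved, stated in full; the proofs are below) =====
def Claim_equal_check_if_one_common_element : Prop := ∀ (list1 : List Int) (list2 : List Int), Dom_check_if_one_common_element list1 list2 → Spec_check_if_one_common_element list1 list2 (check_if_one_common_element list1 list2)

-- ===== LEMMAS AND PROOFS =====

-- A's inner loop adds the number of occurrences of e in list2.
theorem pv_inner (l2 : List Int) (e : Int) (c : Int) :
    l2.foldl (fun c f => if e == f then c + 1 else c) c = c + (l2.count e : Int) := by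
  induction l2 generalizing c with
  | nil => simp
  | cons f t ih =>
    rw [List.foldl_cons, List.count_cons]
    by_cases h : e = f
    · rw [if_pos (by simp [h]), ih]
      have hb : (f == e) = true := by simp [h]
      rw [hb]
      simp only [reduceIte]
      push_cast
      omega
    · have hb : (e == f) = false := beq_eq_false_iff_ne.mpr h
      have hb2 : (f == e) = false := beq_eq_false_iff_ne.mpr (fun hh => h hh.symm)
      rw [hb, hb2]
      simp only [Bool.false_eq_true, if_false, ih]
      omega

theorem pv_cnt (l : List Int) (e : Int) :
    (l.map (fun f => if f = e then (1:Int) else 0)).sum = (l.count e : Int) := by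
  induction l with
  | nil => simp
  | cons g s ih =>
    simp only [List.map_cons, List.sum_cons, ih, List.count_cons]
    by_cases h : g = e
    · have hb : (g == e) = true := by simp [h]
      rw [if_pos h, hb]
      simp only [reduceIte]
      push_cast
      omega
    · have hb : (g == e) = false := beq_eq_false_iff_ne.mpr h
      rw [if_neg h, hb]
      simp only [Bool.false_eq_true, if_false]
      omega

theorem pv_split (l : List Int) (F G : Int → Int) :
    (l.map (fun f => F f + G f)).sum = (l.map F).sum + (l.map G).sum := by
  induction l with
  | nil => simp
  | cons g s ih =>
    simp only [List.map_cons, List.sum_cons, ih]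
    ring

-- symmetry of the total number of matching pairs
theorem pv_sym (l1 l2 : List Int) :
    (l1.map (fun e => (l2.count e : Int))).sum
      = (l2.map (fun f => (l1.count f : Int))).sum := by
  induction l1 with
  | nil => simp
  | cons e t ih =>
    have hstep : (l2.map (fun f => ((e :: t).count f : Int))).sum
        = (l2.map (fun f => (if f = e then (1:Int) else 0) + (t.count f : Int))).sum := by
      congr 1
      apply List.map_congr_left
      intro f _
      rw [List.count_cons]
      by_cases h : f = e
      · have hb : (e == f) = true := by simp [h]
        rw [if_pos h, hb]
        simp only [reduceIte]
        push_cast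
        omega
      · have hb : (e == f) = false := beq_eq_false_iff_ne.mpr (fun hh => h hh.symm)
        rw [if_neg h, hb]
        simp only [Bool.false_eq_true, if_false]
        omega
    have hsplit := pv_split l2 (fun f => if f = e then (1:Int) else 0) (fun f => (t.count f : Int))
    rw [List.map_cons, List.sum_cons, ih, hstep, hsplit, pv_cnt]

theorem check_if_one_common_element_spec : Claim_equal_check_if_one_common_element := by
  intro l1 l2 _
  unfold Spec_check_if_one_common_element check_if_one_common_element check_if_one_common_element_alt
  simp only [PySem.Dict.foldl_insert_getD_add_one_eq_counter]
  have hA : l1.foldl (fun c e => l2.foldl (fun c f => if e == f then c + 1 else c) c) 0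
      = (l1.map (fun e => (l2.count e : Int))).sum := by
    have h1 : l1.foldl (fun c e => l2.foldl (fun c f => if e == f then c + 1 else c) c) 0
        = l1.foldl (fun c e => c + (l2.count e : Int)) 0 := by
      apply PySem.List.foldl_congr_mem
      intro acc e _
      exact pv_inner l2 e acc
    rw [h1, PySem.List.foldl_add]; simp
  have hB : l2.foldl (fun acc f => acc + (PySem.Dict.counter l1).getD f 0) 0
      = (l2.map (fun f => (l1.count f : Int))).sum := by
    have h1 : l2.foldl (fun acc f => acc + (PySem.Dict.counter l1).getD f 0) 0
        = l2.foldl (fun acc f => acc + (l1.count f : Int)) 0 := by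
      apply PySem.List.foldl_congr_mem
      intro acc f _
      rw [PySem.Dict.getD_counter]
    rw [h1, PySem.List.foldl_add]; simp
  simp only [hA, hB, pv_sym]
  split <;> simp_all
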